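-- pv_equiv track=rewrite | github.com/mshsu/compsci-one | calcudoku/solver_funcs.py | check_cages_valid
-- ===== SOURCE A (Python) =====
-- def check_cages_valid(puzzle, cages):
--     for cage in range(0, len(cages)):
--         is_cage_full = check_cage_full(puzzle, cages, cage)
--         cage_sum = check_cage_sum(puzzle, cages, cage)
--         cage_target = cages[cage][0]
--         if is_cage_full is True and cage_sum != cage_target:
--             return False
--         elif is_cage_full is False and cage_sum >= cage_target:
--             return False
--
--     return True
--
-- def check_cage_full(puzzle, cages, cage_num):
--     # cage size = cages[x][1]
--     # row = cages[x][y] // 5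
--     # column = cages[x][y] % 5
--     cage_size = cages[cage_num][1]
--     row = 0
--     col = 0
--     cage_contents = []
--     for box in range(2, cage_size + 2):
--         row = cages[cage_num][box] // 5
--         col = cages[cage_num][box] % 5
--         cage_contents.append(puzzle[row][col])
--     if cage_contents.count(0) > 0:
--         return False
--     else:
--         return True
--
-- def check_cage_sum(puzzle, cages, cage_num):
--     cage_sum = 0
--     cage_size = cages[cage_num][1]
--     row = 0
--     col = 0
--     for box in range(2, cage_size + 2):
--         row = cages[cage_num][box] // 5
--         col = cages[cage_num][box] % 5
--         cage_sum += puzzle[row][col]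
--     return cage_sum
-- ===== SOURCE B (Python) =====
-- def check_cages_valid(puzzle, cages):
--     for cage in cages:
--         target, size = cage[0], cage[1]
--         total, full = 0, True
--         for k in range(size):
--             cell = puzzle[cage[k + 2] // 5][cage[k + 2] % 5]
--             total += cell
--             full = full and cell != 0
--         if (total != target) if full else (total >= target):
--             return False
--     return True
-- ===== Notes on version B (the rewrite author's own statement) =====
-- stated objective: simpler
-- what changed: Inlines and fuses A's two helper functions (one scan building a contents list and counting zeros, a second scan summing) into a single accumulating pass per cage, iterating the cages directly instead of by index, with one conditional rejection test per cage.
import Mathlib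
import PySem

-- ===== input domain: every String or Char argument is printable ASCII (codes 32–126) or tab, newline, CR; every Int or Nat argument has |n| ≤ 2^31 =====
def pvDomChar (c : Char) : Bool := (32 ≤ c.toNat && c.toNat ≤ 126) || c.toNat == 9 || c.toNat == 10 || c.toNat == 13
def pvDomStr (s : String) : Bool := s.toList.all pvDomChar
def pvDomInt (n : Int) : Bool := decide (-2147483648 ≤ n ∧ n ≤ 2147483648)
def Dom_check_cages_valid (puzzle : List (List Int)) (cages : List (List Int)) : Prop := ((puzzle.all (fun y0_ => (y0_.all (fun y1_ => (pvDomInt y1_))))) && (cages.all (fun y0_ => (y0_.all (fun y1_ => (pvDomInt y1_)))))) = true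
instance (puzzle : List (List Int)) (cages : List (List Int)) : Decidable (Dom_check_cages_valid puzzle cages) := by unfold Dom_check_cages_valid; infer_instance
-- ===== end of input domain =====

-- B fuses A's two helper scans (contents list + count, then a second sum scan) into one accumulating
-- pass per cage and iterates the cages directly instead of by index; simpler decomposition, same values.

-- ===== PORT A =====
-- helper check_cage_full, transliterated
def pvCageFull (puzzle cages : List (List Int)) (cage_num : Int) : Bool :=
  let cage_size := PySem.List.pyGetD (PySem.List.pyGetD cages cage_num []) 1 0
  let cage_contents := (PySem.List.pyRange 2 (cage_size + 2)).foldl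
      (fun acc box =>
        let row := PySem.Int.floordiv (PySem.List.pyGetD (PySem.List.pyGetD cages cage_num []) box 0) 5
        let col := PySem.Int.mod (PySem.List.pyGetD (PySem.List.pyGetD cages cage_num []) box 0) 5
        acc ++ [PySem.List.pyGetD (PySem.List.pyGetD puzzle row []) col 0]) []
  if PySem.List.count cage_contents 0 > 0 then false else true

-- helper check_cage_sum, transliterated
def pvCageSum (puzzle cages : List (List Int)) (cage_num : Int) : Int :=
  let cage_size := PySem.List.pyGetD (PySem.List.pyGetD cages cage_num []) 1 0
  (PySem.List.pyRange 2 (cage_size + 2)).foldl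
      (fun cage_sum box =>
        let row := PySem.Int.floordiv (PySem.List.pyGetD (PySem.List.pyGetD cages cage_num []) box 0) 5
        let col := PySem.Int.mod (PySem.List.pyGetD (PySem.List.pyGetD cages cage_num []) box 0) 5
        cage_sum + PySem.List.pyGetD (PySem.List.pyGetD puzzle row []) col 0) 0

-- the main for-loop with its early returns, as structural recursion over the index list
def pvLoopA (puzzle cages : List (List Int)) : List Int → Bool
  | [] => true
  | cage :: rest =>
      let is_cage_full := pvCageFull puzzle cages cage
      let cage_sum := pvCageSum puzzle cages cage
      let cage_target := PySem.List.pyGetD (PySem.List.pyGetD cages cage []) 0 0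
      if is_cage_full == true && !(cage_sum == cage_target) then false
      else if is_cage_full == false && decide (cage_target ≤ cage_sum) then false
      else pvLoopA puzzle cages rest

def check_cages_valid (puzzle : List (List Int)) (cages : List (List Int)) : Bool :=
  pvLoopA puzzle cages (PySem.List.pyRange 0 (cages.length : Int))

-- ===== PORT B =====
-- per-cage fused pass: one loop accumulating (total, full), then the single rejection test
def pvCageBad (puzzle : List (List Int)) (cage : List Int) : Bool :=
  let target := PySem.List.pyGetD cage 0 0
  let size := PySem.List.pyGetD cage 1 0
  let p := (PySem.List.pyRange 0 size).foldl
      (fun (acc : Int × Bool) k =>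
        let cell := PySem.List.pyGetD
          (PySem.List.pyGetD puzzle (PySem.Int.floordiv (PySem.List.pyGetD cage (k + 2) 0) 5) [])
          (PySem.Int.mod (PySem.List.pyGetD cage (k + 2) 0) 5) 0
        (acc.1 + cell, acc.2 && !(cell == 0))) (0, true)
  if p.2 then !(p.1 == target) else decide (target ≤ p.1)

-- the for-loop over the cages themselves, with its early return
def pvLoopB (puzzle : List (List Int)) : List (List Int) → Bool
  | [] => true
  | cage :: rest => if pvCageBad puzzle cage then false else pvLoopB puzzle rest

def check_cages_valid_alt (puzzle : List (List Int)) (cages : List (List Int)) : Bool :=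
  pvLoopB puzzle cages

-- ===== PRECONDITION & SPEC =====
-- the cell read by both programs for box index b
def pvCellOf (puzzle : List (List Int)) (c : List Int) (b : Int) : Int :=
  PySem.List.pyGetD
    (PySem.List.pyGetD puzzle (PySem.Int.floordiv (PySem.List.pyGetD c b 0) 5) [])
    (PySem.Int.mod (PySem.List.pyGetD c b 0) 5) 0

-- the list of cells of a cage
def pvCells (puzzle : List (List Int)) (c : List Int) : List Int :=
  (PySem.List.pyRange 0 (PySem.List.pyGetD c 1 0)).map (fun k => pvCellOf puzzle c (k + 2))

-- a cage whose accesses all stay in range (A's helpers read it without raising)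
def pvValidCage (puzzle : List (List Int)) (c : List Int) : Prop :=
  2 ≤ c.length ∧ PySem.List.pyGetD c 1 0 + 2 ≤ (c.length : Int) ∧
  ∀ k ∈ PySem.List.pyRange 2 (PySem.List.pyGetD c 1 0 + 2),
    PySem.Raise.InRange puzzle.length (PySem.Int.floordiv (PySem.List.pyGetD c k 0) 5) ∧
    PySem.Raise.InRange (PySem.List.pyGetD puzzle (PySem.Int.floordiv (PySem.List.pyGetD c k 0) 5) []).length
      (PySem.Int.mod (PySem.List.pyGetD c k 0) 5)

-- a cage that the common rejection test refuses
def pvBadCage (puzzle : List (List Int)) (c : List Int) : Prop :=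
  ((pvCells puzzle c).contains 0 = true ∧ PySem.List.pyGetD c 0 0 ≤ (pvCells puzzle c).sum) ∨
  ((pvCells puzzle c).contains 0 = false ∧ (pvCells puzzle c).sum ≠ PySem.List.pyGetD c 0 0)

-- Pre_ is exactly the set on which Python A returns: either every cage is readable in range, or
-- some readable prefix ends in a cage the test rejects (A — and B — return False there and never
-- look at the rest, so later cages are unconstrained).
def Pre_check_cages_valid (puzzle : List (List Int)) (cages : List (List Int)) : Prop :=
  (∀ c ∈ cages, pvValidCage puzzle c) ∨
  (∃ i < cages.length, (∀ k ≤ i, pvValidCage puzzle (cages.getD k [])) ∧ pvBadCage puzzle (cages.getD i []))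

instance (puzzle : List (List Int)) (cages : List (List Int)) : Decidable (Pre_check_cages_valid puzzle cages) := by
  unfold Pre_check_cages_valid pvValidCage pvBadCage; infer_instance

def pvWitness_check_cages_valid : List (List Int) × List (List Int) :=
  ([[1, 2, 0], [3, 4, 5]], [[3, 2, 0, 1], [5, 1, 7]])

def Spec_check_cages_valid (puzzle : List (List Int)) (cages : List (List Int)) (out : Bool) : Prop := out = check_cages_valid_alt puzzle cages
instance (puzzle : List (List Int)) (cages : List (List Int)) (out : Bool) : Decidable (Spec_check_cages_valid puzzle cages out) := by unfold Spec_check_cages_valid; infer_instance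

-- ===== CLAIM (what is proved, stated in full; the proofs are below) =====
def Claim_equal_check_cages_valid : Prop := ∀ (puzzle : List (List Int)) (cages : List (List Int)), Dom_check_cages_valid puzzle cages → Pre_check_cages_valid puzzle cages → Spec_check_cages_valid puzzle cages (check_cages_valid puzzle cages)

-- ===== LEMMAS AND PROOFS =====

-- A's box range, shifted by 2, is B's range
theorem pv_range_shift (puzzle : List (List Int)) (c : List Int) (size : Int) :
    (PySem.List.pyRange 2 (size + 2)).map (pvCellOf puzzle c)
      = (PySem.List.pyRange 0 size).map (fun k => pvCellOf puzzle c (k + 2)) := by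
  rw [PySem.List.pyRange_one 2 (size + 2), PySem.List.pyRange_one 0 size]
  have h2 : (size + 2 - 2).toNat = (size - 0).toNat := by omega
  rw [h2, List.map_map, List.map_map]
  refine List.map_congr_left ?_
  intro k _
  show pvCellOf puzzle c (2 + (k : Int)) = pvCellOf puzzle c ((0 : Int) + (k : Int) + 2)
  congr 1
  ring

-- the fused pair-accumulating fold, in closed form
theorem pv_foldl_pair (u : Int → Int) (v : Int → Bool) (l : List Int) (s0 : Int) (b0 : Bool) :
    l.foldl (fun (acc : Int × Bool) x => (acc.1 + u x, acc.2 && v x)) (s0, b0)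
      = (s0 + (l.map u).sum, b0 && l.all v) := by
  induction l generalizing s0 b0 with
  | nil => simp
  | cons x xs ih =>
      simp only [List.foldl_cons, List.map_cons, List.sum_cons, List.all_cons, ih]
      rw [add_assoc, Bool.and_assoc]

-- all-nonzero of the mapped list is not-contains-zero
theorem pv_all_ne_zero (u : Int → Int) (l : List Int) :
    (l.all fun k => !(u k == 0)) = !((l.map u).contains 0) := by
  induction l with
  | nil => rfl
  | cons x xs ih =>
      by_cases h : u x = 0
      · simp [h, ih]
      · simp [h, Ne.symm h, ih]

-- one step of A's loop is one step of B's loop, for the corresponding cage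
theorem pv_step_eq (puzzle cages : List (List Int)) (j : Nat) (hj : j < cages.length) (rest : Bool) :
    (if pvCageFull puzzle cages (j : Int) == true && !(pvCageSum puzzle cages (j : Int) == PySem.List.pyGetD (PySem.List.pyGetD cages (j : Int) []) 0 0) then false
     else if pvCageFull puzzle cages (j : Int) == false && decide (PySem.List.pyGetD (PySem.List.pyGetD cages (j : Int) []) 0 0 ≤ pvCageSum puzzle cages (j : Int)) then false
     else rest) = (if pvCageBad puzzle cages[j] then false else rest) := by
  have hc : PySem.List.pyGetD cages ((j : Nat) : Int) [] = cages[j] := by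
    rw [PySem.List.pyGetD_natCast, List.getD_eq_getElem?_getD, List.getElem?_eq_getElem hj]
    rfl
  have hsum : pvCageSum puzzle cages (j : Int) = (pvCells puzzle cages[j]).sum := by
    rw [pvCageSum, hc]
    show (PySem.List.pyRange 2 (PySem.List.pyGetD cages[j] 1 0 + 2)).foldl
        (fun cage_sum box => cage_sum + pvCellOf puzzle cages[j] box) 0 = _
    rw [PySem.List.foldl_add _ (pvCellOf puzzle cages[j]) 0, zero_add, pv_range_shift]
    rfl
  have hfull : pvCageFull puzzle cages (j : Int) = !((pvCells puzzle cages[j]).contains 0) := by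
    rw [pvCageFull, hc]
    show (if PySem.List.count ((PySem.List.pyRange 2 (PySem.List.pyGetD cages[j] 1 0 + 2)).foldl
        (fun acc box => acc ++ [pvCellOf puzzle cages[j] box]) []) 0 > 0 then false else true) = _
    rw [PySem.List.foldl_append_singleton_eq_map (pvCellOf puzzle cages[j]), List.nil_append,
        pv_range_shift, PySem.List.count_eq]
    show (if List.count 0 (pvCells puzzle cages[j]) > 0 then false else true) = _
    cases h0 : (pvCells puzzle cages[j]).contains 0 with
    | false =>
        have hmem : (0 : Int) ∉ pvCells puzzle cages[j] := by simpa [List.contains_eq_mem] using h0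
        simp [List.count_eq_zero.mpr hmem]
    | true =>
        have hmem : (0 : Int) ∈ pvCells puzzle cages[j] := by simpa [List.contains_eq_mem] using h0
        simp [List.count_pos_iff.mpr hmem]
  have hbad : pvCageBad puzzle cages[j]
      = (if !((pvCells puzzle cages[j]).contains 0)
         then !((pvCells puzzle cages[j]).sum == PySem.List.pyGetD cages[j] 0 0)
         else decide (PySem.List.pyGetD cages[j] 0 0 ≤ (pvCells puzzle cages[j]).sum)) := by
    rw [pvCageBad]
    show (if ((PySem.List.pyRange 0 (PySem.List.pyGetD cages[j] 1 0)).foldl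
            (fun (acc : Int × Bool) k => (acc.1 + pvCellOf puzzle cages[j] (k + 2),
              acc.2 && !(pvCellOf puzzle cages[j] (k + 2) == 0))) (0, true)).2
        then !(((PySem.List.pyRange 0 (PySem.List.pyGetD cages[j] 1 0)).foldl
            (fun (acc : Int × Bool) k => (acc.1 + pvCellOf puzzle cages[j] (k + 2),
              acc.2 && !(pvCellOf puzzle cages[j] (k + 2) == 0))) (0, true)).1 == PySem.List.pyGetD cages[j] 0 0)
        else decide (PySem.List.pyGetD cages[j] 0 0 ≤ ((PySem.List.pyRange 0 (PySem.List.pyGetD cages[j] 1 0)).foldl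
            (fun (acc : Int × Bool) k => (acc.1 + pvCellOf puzzle cages[j] (k + 2),
              acc.2 && !(pvCellOf puzzle cages[j] (k + 2) == 0))) (0, true)).1)) = _
    rw [pv_foldl_pair (fun k => pvCellOf puzzle cages[j] (k + 2))
        (fun k => !(pvCellOf puzzle cages[j] (k + 2) == 0))]
    rw [pv_all_ne_zero (fun k => pvCellOf puzzle cages[j] (k + 2))]
    simp only [zero_add, Bool.true_and]
    rfl
  rw [hsum, hfull, hc, hbad]
  cases (pvCells puzzle cages[j]).contains 0 <;> simp

-- the whole loop of A from index j equals B's loop on the remaining cages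
theorem pv_loop_eq (puzzle cages : List (List Int)) :
    ∀ (k j : Nat), j + k = cages.length →
      pvLoopA puzzle cages (PySem.List.pyRange (j : Int) (cages.length : Int))
        = pvLoopB puzzle (cages.drop j) := by
  intro k
  induction k with
  | zero =>
      intro j hjk
      rw [PySem.List.pyRange_one_eq_nil (by omega), List.drop_of_length_le (by omega)]
      rfl
  | succ k ih =>
      intro j hjk
      have hj : j < cages.length := by omega
      rw [PySem.List.pyRange_one_cons (by exact_mod_cast hj)]
      rw [pvLoopA]
      have h1 : (j : Int) + 1 = ((j + 1 : Nat) : Int) := by push_cast; ring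
      rw [h1, ih (j + 1) (by omega)]
      rw [pv_step_eq puzzle cages j hj]
      rw [List.drop_eq_getElem_cons hj, pvLoopB]

-- ===== VERDICT (by name: the statement is the Claim_ definition above) =====
theorem check_cages_valid_spec : Claim_equal_check_cages_valid := by
  intro puzzle cages _ _
  unfold Spec_check_cages_valid check_cages_valid check_cages_valid_alt
  have h := pv_loop_eq puzzle cages cages.length 0 (by omega)
  simpa using h
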